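-- pv_equiv track=rewrite | github.com/courtneyhussein/scrabble-scorer-python-asgn | scrabble_scorer.py | vowel_bonus_scorer
-- ===== SOURCE A (Python) =====
-- def vowel_bonus_scorer(word):
--     word_score = 0
--     vowels = 'aeiou'
--     for char in word.lower():
--         if char in vowels:
--             word_score += 3
--         else:
--             word_score += 1
--     return f'Vowel Bonus Scorer - {word} is worth: {word_score} points'
-- ===== SOURCE B (Python) =====
-- def vowel_bonus_scorer(word):
--     lowered = word.lower()
--     word_score = len(lowered)
--     for vowel in 'aeiou':
--         word_score += 2 * lowered.count(vowel)
--     return f'Vowel Bonus Scorer - {word} is worth: {word_score} points'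
-- ===== Notes on version B (the rewrite author's own statement) =====
-- stated objective: faster
-- what changed: Replaces the per-character 3-or-1 branching accumulation over the word with five staged str.count passes (one per vowel) combined by the closed form len + 2*count(vowel); the per-character Python loop disappears into C-level counting calls.
import Mathlib
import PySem

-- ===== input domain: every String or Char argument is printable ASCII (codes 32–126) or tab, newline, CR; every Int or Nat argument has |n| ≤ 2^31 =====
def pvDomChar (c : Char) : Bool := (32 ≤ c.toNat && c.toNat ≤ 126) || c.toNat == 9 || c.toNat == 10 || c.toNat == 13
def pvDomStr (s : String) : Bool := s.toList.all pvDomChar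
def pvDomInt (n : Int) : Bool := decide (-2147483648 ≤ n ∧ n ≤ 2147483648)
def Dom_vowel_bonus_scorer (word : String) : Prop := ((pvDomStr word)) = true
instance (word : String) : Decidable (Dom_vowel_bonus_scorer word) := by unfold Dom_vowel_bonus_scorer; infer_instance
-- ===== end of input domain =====

-- B replaces A's per-character 3-or-1 branching scan with five staged per-vowel counting passes plus the closed form len + 2*count.

-- ===== PORT A =====
-- A: loop over word.lower(), +3 for a vowel, +1 otherwise
def vowel_bonus_scorer (word : String) : String :=
  let vowels : List Char := "aeiou".toList
  let word_score : Int :=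
    (PySem.Chars.lower word.toList).foldl
      (fun s c => if PySem.Chars.isIn [c] vowels then s + 3 else s + 1) 0
  "Vowel Bonus Scorer - " ++ word ++ " is worth: " ++ PySem.Int.toStr word_score ++ " points"

-- ===== PORT B =====
-- B: start from len(lowered); for each of the five vowels add 2 * lowered.count(vowel)
def vowel_bonus_scorer_alt (word : String) : String :=
  let lowered := PySem.Chars.lower word.toList
  let word_score : Int :=
    "aeiou".toList.foldl
      (fun s v => s + 2 * (PySem.Chars.count lowered [v] : Int))
      (lowered.length : Int)
  "Vowel Bonus Scorer - " ++ word ++ " is worth: " ++ PySem.Int.toStr word_score ++ " points"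

-- ===== PRECONDITION & SPEC =====
def Spec_vowel_bonus_scorer (word : String) (out : String) : Prop := out = vowel_bonus_scorer_alt word
instance (word : String) (out : String) : Decidable (Spec_vowel_bonus_scorer word out) := by unfold Spec_vowel_bonus_scorer; infer_instance

-- ===== CLAIM (what is proved, stated in full; the proofs are below) =====
def Claim_equal_vowel_bonus_scorer : Prop := ∀ (word : String), Dom_vowel_bonus_scorer word → Spec_vowel_bonus_scorer word (vowel_bonus_scorer word)

-- ===== LEMMAS AND PROOFS =====

-- A's loop: starting from s, each char adds 3 or 1 ⇒ s + length + 2·(number of chars satisfying p)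
theorem score_foldl (cs : List Char) (p : Char → Bool) (s : Int) :
    cs.foldl (fun s c => if p c then s + 3 else s + 1) s
      = s + (cs.length : Int) + 2 * (cs.countP p : Int) := by
  induction cs generalizing s with
  | nil => simp
  | cons c cs ih =>
    simp only [List.foldl_cons, List.countP_cons, List.length_cons, ih]
    by_cases h : p c = true <;> simp [h] <;> ring

-- 'c in vs' for a single char is list membership
theorem isIn_single (c : Char) (vs : List Char) :
    PySem.Chars.isIn [c] vs = decide (c ∈ vs) := by
  by_cases h : c ∈ vs
  · simp only [h, decide_true]
    exact (PySem.Chars.isIn_iff_infix _ _).mpr ((List.singleton_infix_iff c vs).mpr h)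
  · simp only [h, decide_false]
    by_contra hb
    exact h ((List.singleton_infix_iff c vs).mp
      ((PySem.Chars.isIn_iff_infix _ _).mp (by revert hb; cases PySem.Chars.isIn [c] vs <;> simp)))

-- str.count with a single-character pattern is List.count
theorem count_go_singleton (v : Char) (l : List Char) (fuel acc : Nat) (h : l.length ≤ fuel) :
    PySem.Chars.count.go [v] fuel l acc = acc + l.count v := by
  induction l generalizing fuel acc with
  | nil => cases fuel <;> simp [PySem.Chars.count.go]
  | cons c t ih =>
    cases fuel with
    | zero => simp at h
    | succ f =>
      have hf : t.length ≤ f := by simpa using h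
      by_cases hv : v = c
      · subst hv
        simp [PySem.Chars.count.go, List.isPrefixOf, ih _ _ hf]
        omega
      · have hvc : (v == c) = false := by simp [hv]
        simp [PySem.Chars.count.go, List.isPrefixOf, hvc, ih _ _ hf,
          Ne.symm hv]

theorem count_singleton (cs : List Char) (v : Char) :
    PySem.Chars.count cs [v] = cs.count v := by
  simp [PySem.Chars.count, count_go_singleton v cs cs.length 0 le_rfl]

-- membership count in the five distinct vowels = the sum of the five per-vowel counts
theorem countP_vowels (cs : List Char) :
    cs.countP (fun c => decide (c ∈ ['a', 'e', 'i', 'o', 'u']))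
      = cs.count 'a' + cs.count 'e' + cs.count 'i' + cs.count 'o' + cs.count 'u' := by
  induction cs with
  | nil => simp
  | cons c cs ih =>
    simp only [List.countP_cons, List.count_cons, ih]
    by_cases h1 : c = 'a' <;> by_cases h2 : c = 'e' <;> by_cases h3 : c = 'i' <;>
      by_cases h4 : c = 'o' <;> by_cases h5 : c = 'u' <;> simp_all <;> omega

-- ===== VERDICT (by name: the statement is the Claim_ definition above) =====
theorem vowel_bonus_scorer_spec : Claim_equal_vowel_bonus_scorer := by
  intro word _
  unfold Spec_vowel_bonus_scorer vowel_bonus_scorer vowel_bonus_scorer_alt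
  have hv : "aeiou".toList = ['a', 'e', 'i', 'o', 'u'] := rfl
  simp only [hv, score_foldl, List.foldl_cons, List.foldl_nil, count_singleton]
  have hcp : (PySem.Chars.lower word.toList).countP
      (fun c => PySem.Chars.isIn [c] ['a', 'e', 'i', 'o', 'u'])
      = (PySem.Chars.lower word.toList).countP
        (fun c => decide (c ∈ ['a', 'e', 'i', 'o', 'u'])) :=
    List.countP_congr (fun c _ => by rw [isIn_single])
  rw [hcp, countP_vowels]
  push_cast
  ring_nf
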